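-- pv_equiv track=rewrite | github.com/SteveGJones/ai-first-sdlc-practices | tools/validation/validate-agents.py | _is_valid_category
-- ===== SOURCE A (Python) =====
-- def _is_valid_category(category: str) -> bool:
--     """Check if category follows expected patterns."""
--     valid_patterns = [
--         "core/",
--         "languages/",
--         "ux/",
--         "devops/",
--         "data/",
--         "compliance/",
--         "ai-ml/",
--         "agent-development/",
--         "mcp/",
--         "testing/",
--         "architecture/",
--         "review/",
--     ]
--
--     return any(category.startswith(pattern) for pattern in valid_patterns)
-- ===== SOURCE B (Python) =====
-- _VALID_NAMES = ("core", "languages", "ux", "devops", "data", "compliance",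
--                 "ai-ml", "agent-development", "mcp", "testing", "architecture",
--                 "review")
--
--
-- def _known(name):
--     return name in _VALID_NAMES
--
--
-- def _is_valid_category(category: str) -> bool:
--     """Check if category follows expected patterns."""
--     acc = ""
--     for ch in category:
--         if ch == "/":
--             return _known(acc)
--         acc += ch
--     return False
-- ===== Notes on version B (the rewrite author's own statement) =====
-- stated objective: alternative
-- what changed: Instead of scanning 12 startswith prefixes over the whole string, B makes a single left-to-right character scan that accumulates the segment before the first slash and, on reaching the slash, tests that segment against the tuple of known category names; a string with no slash yields False.
import Mathlib
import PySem

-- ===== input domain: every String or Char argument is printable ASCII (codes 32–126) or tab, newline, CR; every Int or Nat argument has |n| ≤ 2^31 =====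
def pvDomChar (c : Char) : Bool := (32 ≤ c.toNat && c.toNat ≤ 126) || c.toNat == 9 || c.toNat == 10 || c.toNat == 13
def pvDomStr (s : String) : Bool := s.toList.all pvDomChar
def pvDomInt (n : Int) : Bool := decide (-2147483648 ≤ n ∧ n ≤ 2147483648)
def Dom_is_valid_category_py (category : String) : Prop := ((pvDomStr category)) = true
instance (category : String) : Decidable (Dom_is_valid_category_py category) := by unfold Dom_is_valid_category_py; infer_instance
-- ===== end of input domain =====

-- B replaces A's scan over 12 startswith prefixes by one character scan that accumulates the segment before the first '/' and tests it against the known names (alternative decomposition).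


-- ===== PORT A =====
def pvValidPatterns : List String :=
  ["core/", "languages/", "ux/", "devops/", "data/", "compliance/",
   "ai-ml/", "agent-development/", "mcp/", "testing/", "architecture/", "review/"]

def is_valid_category_py (category : String) : Bool :=
  pvValidPatterns.any (fun pattern => PySem.Str.startswith category pattern)

-- ===== PORT B =====
-- _known: membership of the name in the tuple of valid names (a chain of comparisons)
def pvKnown (name : String) : Bool :=
  name == "core" || name == "languages" || name == "ux" || name == "devops" ||
  name == "data" || name == "compliance" || name == "ai-ml" ||
  name == "agent-development" || name == "mcp" || name == "testing" ||
  name == "architecture" || name == "review"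

-- the for-loop of Source B: walk the characters, growing acc until the first '/'
def pvScanHead : List Char → List Char → Bool
  | [], _ => false
  | c :: rest, acc => if c == '/' then pvKnown (String.ofList acc) else pvScanHead rest (acc ++ [c])

def is_valid_category_py_alt (category : String) : Bool :=
  pvScanHead category.toList []

-- ===== PRECONDITION & SPEC =====
def Spec_is_valid_category_py (category : String) (out : Bool) : Prop := out = is_valid_category_py_alt category
instance (category : String) (out : Bool) : Decidable (Spec_is_valid_category_py category out) := by unfold Spec_is_valid_category_py; infer_instance

-- ===== CLAIM (what is proved, stated in full; the proofs are below) =====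
def Claim_equal_is_valid_category_py : Prop := ∀ (category : String), Dom_is_valid_category_py category → Spec_is_valid_category_py category (is_valid_category_py category)

-- ===== LEMMAS AND PROOFS =====

-- The names A's patterns are built from (proof-side helper).
def pvNamesL : List String :=
  ["core", "languages", "ux", "devops", "data", "compliance",
   "ai-ml", "agent-development", "mcp", "testing", "architecture", "review"]

theorem pv_patterns_eq : pvValidPatterns = pvNamesL.map (fun n => n ++ "/") := by decide

theorem pv_no_slash : ∀ n ∈ pvNamesL, '/' ∉ n.toList := by decide

theorem pv_known_iff (s : String) : pvKnown s = true ↔ s ∈ pvNamesL := by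
  simp only [pvKnown, pvNamesL, Bool.or_eq_true, beq_iff_eq, List.mem_cons]
  tauto

-- The loop of B computes: if there is a '/', test the segment before the first one; else False.
theorem pv_scan_spec (cs : List Char) : ∀ acc : List Char,
    pvScanHead cs acc =
      if '/' ∈ cs then pvKnown (String.ofList (acc ++ cs.takeWhile (· != '/'))) else false := by
  induction cs with
  | nil => intro acc; simp [pvScanHead]
  | cons c rest ih =>
    intro acc
    by_cases hc : c = '/'
    · subst hc; simp [pvScanHead]
    · have hc' : ¬('/' = c) := fun h => hc h.symm
      simp [pvScanHead, hc, hc', ih, List.append_assoc]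

-- For a slash-free p: cs starts with p++"/" iff cs contains a '/' and the segment
-- before the first '/' is exactly p.
theorem pv_key (cs : List Char) : ∀ p : List Char, '/' ∉ p →
    ((p ++ ['/']) <+: cs ↔ ('/' ∈ cs ∧ cs.takeWhile (· != '/') = p)) := by
  induction cs with
  | nil => intro p hp; simp
  | cons c rest ih =>
    intro p hp
    cases p with
    | nil =>
      by_cases hc : c = '/'
      · subst hc; simp [List.cons_prefix_cons]
      · have hc' : ¬('/' = c) := fun h => hc h.symm
        simp [hc, hc', List.cons_prefix_cons]
    | cons a p' =>
      have ha : a ≠ '/' := fun h => hp (by simp [h])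
      have hp' : '/' ∉ p' := fun h => hp (by simp [h])
      by_cases hc : c = '/'
      · subst hc
        simp [List.cons_prefix_cons]
        intro h
        exact absurd h ha
      · have hc' : ¬('/' = c) := fun h => hc h.symm
        simp only [List.cons_append, List.cons_prefix_cons, List.takeWhile_cons,
          show (c != '/') = true by simpa using hc, if_true, List.mem_cons, hc',
          false_or, List.cons_eq_cons]
        rw [ih p' hp']
        constructor
        · rintro ⟨h1, h2, h3⟩
          exact ⟨h2, h1.symm, h3⟩
        · rintro ⟨h1, h2, h3⟩
          exact ⟨h2.symm, h1, h3⟩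

-- ===== VERDICT (by name: the statement is the Claim_ definition above) =====
theorem is_valid_category_py_spec : Claim_equal_is_valid_category_py := by
  intro category _
  unfold Spec_is_valid_category_py
  rw [Bool.eq_iff_iff]
  set cs := category.toList with hcs
  have hA : is_valid_category_py category = true ↔
      ∃ n ∈ pvNamesL, (n.toList ++ ['/']) <+: cs := by
    simp only [is_valid_category_py, List.any_eq_true, pv_patterns_eq, List.mem_map]
    constructor
    · rintro ⟨p, ⟨n, hn, rfl⟩, hsw⟩
      refine ⟨n, hn, ?_⟩
      have hsw' : PySem.Chars.startswith cs ((n ++ "/").toList) = true := by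
        simpa using hsw
      have := (PySem.Chars.startswith_iff _ _).mp hsw'
      simpa using this
    · rintro ⟨n, hn, hpre⟩
      refine ⟨n ++ "/", ⟨n, hn, rfl⟩, ?_⟩
      simp only [PySem.Str.startswith_eq]
      exact (PySem.Chars.startswith_iff _ _).mpr (by simpa using hpre)
  have hB : is_valid_category_py_alt category = true ↔
      ('/' ∈ cs ∧ pvKnown (String.ofList (cs.takeWhile (· != '/'))) = true) := by
    rw [is_valid_category_py_alt, ← hcs, pv_scan_spec]
    split_ifs with h <;> simp [h]
  rw [hA, hB]
  constructor
  · rintro ⟨n, hn, hpre⟩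
    obtain ⟨hm, ht⟩ := (pv_key cs n.toList (pv_no_slash n hn)).mp hpre
    refine ⟨hm, ?_⟩
    rw [ht, pv_known_iff]
    simpa [String.ofList_toList] using hn
  · rintro ⟨hm, hk⟩
    have hmem := (pv_known_iff _).mp hk
    refine ⟨String.ofList (cs.takeWhile (· != '/')), hmem, ?_⟩
    refine (pv_key cs _ (pv_no_slash _ hmem)).mpr ⟨hm, ?_⟩
    rw [String.toList_ofList]
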